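-- pv_equiv track=rewrite | github.com/SAStef/ChemistrySolver | chemistry_solver/electron_config.py | get_orbital_diagram
-- ===== SOURCE A (Python) =====
-- ORBITAL_CAPACITIES = {
--     "s": 2,
--     "p": 6,
--     "d": 10,
--     "f": 14,
--     "g": 18
-- }
--
-- def parse_orbital_notation(orbital_str):
--     """Parse an orbital notation like '2p3' into principal quantum number, orbital type, and electrons."""
--     if not orbital_str:
--         return None
--
--     # Extract the principal quantum number and orbital type
--     i = 0
--     while i < len(orbital_str) and orbital_str[i].isdigit():
--         i += 1
--
--     if i == 0 or i == len(orbital_str):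
--         return None
--
--     n = int(orbital_str[:i])
--
--     # Extract the orbital type
--     j = i
--     while j < len(orbital_str) and orbital_str[j].isalpha():
--         j += 1
--
--     if j == i:
--         return None
--
--     orbital_type = orbital_str[i:j]
--
--     # Extract the number of electrons
--     electrons = None
--     if j < len(orbital_str):
--         electrons = int(orbital_str[j:])
--
--     return {
--         "n": n,
--         "orbital_type": orbital_type,
--         "electrons": electrons
--     }
--
-- def get_orbital_diagram(orbital_str):
--     """Generate an orbital diagram showing electrons as arrows (↑ and ↓)."""
--     parsed = parse_orbital_notation(orbital_str)
--     if not parsed or parsed["electrons"] is None: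
--         return "Invalid orbital notation"
--
--     n = parsed["n"]
--     orbital_type = parsed["orbital_type"]
--     electrons = parsed["electrons"]
--
--     if orbital_type not in ORBITAL_CAPACITIES:
--         return f"Invalid orbital type: {orbital_type}"
--
--     capacity = ORBITAL_CAPACITIES[orbital_type]
--     if electrons > capacity:
--         return f"Too many electrons for {orbital_type} orbital (max: {capacity})"
--
--     # Number of orbitals based on orbital type
--     num_orbitals = {"s": 1, "p": 3, "d": 5, "f": 7, "g": 9}[orbital_type]
--
--     # Create orbital diagram
--     diagram = []
--     remaining = electrons
--
--     for _ in range(num_orbitals):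
--         if remaining >= 2:
--             diagram.append("↑↓")
--             remaining -= 2
--         elif remaining == 1:
--             diagram.append("↑ ")
--             remaining -= 1
--         else:
--             diagram.append("  ")
--
--     return f"{n}{orbital_type}: |" + "| |".join(diagram) + "|"
-- ===== SOURCE B (Python) =====
-- ORBITAL_CAPACITIES = {
--     "s": 2,
--     "p": 6,
--     "d": 10,
--     "f": 14,
--     "g": 18
-- }
--
-- def parse_orbital_notation(orbital_str):
--     """Parse an orbital notation like '2p3' into principal quantum number, orbital type, and electrons."""
--     if not orbital_str:
--         return None
--     i = 0
--     while i < len(orbital_str) and orbital_str[i].isdigit():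
--         i += 1
--     if i == 0 or i == len(orbital_str):
--         return None
--     n = int(orbital_str[:i])
--     j = i
--     while j < len(orbital_str) and orbital_str[j].isalpha():
--         j += 1
--     if j == i:
--         return None
--     orbital_type = orbital_str[i:j]
--     electrons = None
--     if j < len(orbital_str):
--         electrons = int(orbital_str[j:])
--     return {"n": n, "orbital_type": orbital_type, "electrons": electrons}
--
-- def get_orbital_diagram(orbital_str):
--     """Generate an orbital diagram showing electrons as arrows (↑ and ↓)."""
--     parsed = parse_orbital_notation(orbital_str)
--     if not parsed or parsed["electrons"] is None:
--         return "Invalid orbital notation"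
--     n = parsed["n"]
--     orbital_type = parsed["orbital_type"]
--     electrons = parsed["electrons"]
--     if orbital_type not in ORBITAL_CAPACITIES:
--         return f"Invalid orbital type: {orbital_type}"
--     capacity = ORBITAL_CAPACITIES[orbital_type]
--     if electrons > capacity:
--         return f"Too many electrons for {orbital_type} orbital (max: {capacity})"
--     # Closed-form fill: no per-orbital loop.  Each orbital holds two electrons,
--     # so the diagram is pairs of arrows, then at most one lone arrow, then blanks.
--     num_orbitals = capacity // 2
--     filled = max(electrons, 0)
--     pairs = filled // 2
--     singles = filled % 2
--     empties = num_orbitals - pairs - singles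
--     diagram = ["↑↓"] * pairs + ["↑ "] * singles + ["  "] * empties
--     return f"{n}{orbital_type}: |" + "| |".join(diagram) + "|"
-- ===== Notes on version B (the rewrite author's own statement) =====
-- stated objective: alternative
-- what changed: The per-orbital fill loop with a decrementing electron counter is replaced by a closed-form count decomposition (pairs = filled//2, singles = filled%2, empties = rest) and the diagram is built by concatenating three replicated blocks, with num_orbitals computed as capacity//2 instead of a second lookup table.
import Mathlib
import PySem

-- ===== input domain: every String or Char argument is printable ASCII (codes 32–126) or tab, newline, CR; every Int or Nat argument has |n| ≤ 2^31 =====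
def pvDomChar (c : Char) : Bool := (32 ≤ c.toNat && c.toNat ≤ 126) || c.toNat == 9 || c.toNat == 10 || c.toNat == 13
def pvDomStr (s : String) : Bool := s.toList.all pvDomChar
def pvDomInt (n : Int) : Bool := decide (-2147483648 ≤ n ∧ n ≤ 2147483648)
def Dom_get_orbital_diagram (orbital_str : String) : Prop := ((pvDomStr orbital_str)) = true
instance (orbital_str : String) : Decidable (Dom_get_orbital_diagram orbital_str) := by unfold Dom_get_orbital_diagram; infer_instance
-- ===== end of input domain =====

-- B replaces A's per-orbital fill loop (decrementing electron counter, branch per slot) by a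
-- closed-form count decomposition: pairs = filled//2, singles = filled%2, empties = rest, and the
-- diagram is three replicated blocks concatenated; objective: alternative decomposition, same cost.
-- Parsing and validation are shared, as in the Pythons.

-- ===== PORT A =====
-- shared module helper parse_orbital_notation (identical in both Pythons), on List Char
def pvParse (cs : List Char) : Option (Int × List Char × Option Int) :=
  if cs.isEmpty then none
  else
    let ds := cs.takeWhile PySem.Chars.isdigit          -- the two index-advancing while loops
    let rest := cs.dropWhile PySem.Chars.isdigit        -- are the digit/alpha prefix scans
    if ds.isEmpty || rest.isEmpty then none             -- i == 0 or i == len(orbital_str)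
    else
      let n := (PySem.Int.ofChars? ds).getD 0           -- int over a nonempty all-digit prefix: never raises
      let al := rest.takeWhile PySem.Chars.isalpha
      let tail := rest.dropWhile PySem.Chars.isalpha
      if al.isEmpty then none                           -- j == i
      else
        let electrons : Option Int :=
          if tail.isEmpty then none
          else some ((PySem.Int.ofChars? tail).getD 0)  -- int(orbital_str[j:]); ValueError (none) excluded by Pre_
        some (n, al, electrons)

-- ORBITAL_CAPACITIES
def pvCapacities : PySem.Dict (List Char) Int :=
  PySem.Dict.ofList [(['s'],2),(['p'],6),(['d'],10),(['f'],14),(['g'],18)]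

-- A's inline {"s": 1, "p": 3, "d": 5, "f": 7, "g": 9}
def pvNumOrbitals : PySem.Dict (List Char) Int :=
  PySem.Dict.ofList [(['s'],1),(['p'],3),(['d'],5),(['f'],7),(['g'],9)]

def get_orbital_diagram (orbital_str : String) : String :=
  match pvParse orbital_str.toList with
  | none => "Invalid orbital notation"
  | some (n, orbital_type, eo) =>
    match eo with
    | none => "Invalid orbital notation"
    | some electrons =>
      match pvCapacities.get? orbital_type with         -- 'not in' test + subscript, fused
      | none => String.ofList ("Invalid orbital type: ".toList ++ orbital_type)
      | some capacity =>
        if capacity < electrons then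
          String.ofList ("Too many electrons for ".toList ++ orbital_type ++
            " orbital (max: ".toList ++ PySem.Int.toChars capacity ++ [')'])
        else
          let num_orbitals := (pvNumOrbitals.get? orbital_type).getD 0   -- KeyError unreachable: same keys as ORBITAL_CAPACITIES
          let st := (PySem.List.pyRange 0 num_orbitals 1).foldl
            (fun (st : List (List Char) × Int) (_ : Int) =>
              if 2 ≤ st.2 then (st.1 ++ [['↑','↓']], st.2 - 2)
              else if st.2 = 1 then (st.1 ++ [['↑',' ']], st.2 - 1)
              else (st.1 ++ [[' ',' ']], st.2)) ([], electrons)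
          String.ofList (PySem.Int.toChars n ++ orbital_type ++ [':',' ','|'] ++
            PySem.Chars.join ['|',' ','|'] st.1 ++ ['|'])

-- ===== PORT B =====
def get_orbital_diagram_alt (orbital_str : String) : String :=
  match pvParse orbital_str.toList with
  | none => "Invalid orbital notation"
  | some (n, orbital_type, eo) =>
    match eo with
    | none => "Invalid orbital notation"
    | some electrons =>
      match pvCapacities.get? orbital_type with
      | none => String.ofList ("Invalid orbital type: ".toList ++ orbital_type)
      | some capacity =>
        if capacity < electrons then
          String.ofList ("Too many electrons for ".toList ++ orbital_type ++
            " orbital (max: ".toList ++ PySem.Int.toChars capacity ++ [')'])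
        else
          let num_orbitals := PySem.Int.floordiv capacity 2
          let filled := max electrons 0
          let pairs := PySem.Int.floordiv filled 2
          let singles := PySem.Int.mod filled 2
          let empties := num_orbitals - pairs - singles
          -- ["↑↓"] * pairs + …: Python list repetition, empty for a non-positive count = .toNat
          let diagram := List.replicate pairs.toNat (['↑','↓'] : List Char) ++
            List.replicate singles.toNat ['↑',' '] ++ List.replicate empties.toNat [' ',' ']
          String.ofList (PySem.Int.toChars n ++ orbital_type ++ [':',' ','|'] ++
            PySem.Chars.join ['|',' ','|'] diagram ++ ['|'])

-- ===== PRECONDITION & SPEC =====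
-- Pre_ excludes exactly the inputs where int(orbital_str[j:]) raises ValueError (digits, then letters,
-- then a nonempty tail that is not an int literal); A raises there, and B raises identically.
def Pre_get_orbital_diagram (orbital_str : String) : Prop :=
  (orbital_str.toList.takeWhile PySem.Chars.isdigit).isEmpty = true ∨
  ((orbital_str.toList.dropWhile PySem.Chars.isdigit).takeWhile PySem.Chars.isalpha).isEmpty = true ∨
  ((orbital_str.toList.dropWhile PySem.Chars.isdigit).dropWhile PySem.Chars.isalpha).isEmpty = true ∨
  (PySem.Int.ofChars? ((orbital_str.toList.dropWhile PySem.Chars.isdigit).dropWhile PySem.Chars.isalpha)).isSome = true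
instance (orbital_str : String) : Decidable (Pre_get_orbital_diagram orbital_str) := by
  unfold Pre_get_orbital_diagram; infer_instance
def pvWitness_get_orbital_diagram : String := "2p3"

def Spec_get_orbital_diagram (orbital_str : String) (out : String) : Prop := out = get_orbital_diagram_alt orbital_str
instance (orbital_str : String) (out : String) : Decidable (Spec_get_orbital_diagram orbital_str out) := by unfold Spec_get_orbital_diagram; infer_instance

-- ===== CLAIM (what is proved, stated in full; the proofs are below) =====
def Claim_equal_get_orbital_diagram : Prop := ∀ (orbital_str : String), Dom_get_orbital_diagram orbital_str → Pre_get_orbital_diagram orbital_str → Spec_get_orbital_diagram orbital_str (get_orbital_diagram orbital_str)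

-- ===== LEMMAS AND PROOFS =====

-- A's loop body, abstracted
def pvStep (st : List (List Char) × Int) : List (List Char) × Int :=
  if 2 ≤ st.2 then (st.1 ++ [['↑','↓']], st.2 - 2)
  else if st.2 = 1 then (st.1 ++ [['↑',' ']], st.2 - 1)
  else (st.1 ++ [[' ',' ']], st.2)

-- the symbol A draws when the remaining count before this orbital is m (m = e - 2k for orbital k)
def pvSym (m : Int) : List Char :=
  if 2 ≤ m then ['↑','↓'] else if m = 1 then ['↑',' '] else [' ',' ']

-- remaining electrons after n orbitals have been filled
def pvRem (e : Int) (n : Nat) : Int := if 0 ≤ e then max 0 (e - 2 * n) else e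

lemma pvStep_rem (e : Int) (n : Nat) (xs : List (List Char)) :
    pvStep (xs, pvRem e n) = (xs ++ [pvSym (e - 2 * n)], pvRem e (n + 1)) := by
  unfold pvStep pvRem pvSym
  split_ifs <;> simp_all <;> omega

lemma pvLoop_eq (n : Nat) (e : Int) (acc : List (List Char)) :
    (List.range n).foldl (fun st (_ : Nat) => pvStep st) (acc, e)
      = (acc ++ (List.range n).map (fun k : Nat => pvSym (e - 2 * (k : Int))), pvRem e n) := by
  induction n with
  | zero => simp [pvRem]
  | succ n ih =>
    rw [List.range_succ, List.foldl_append, ih, List.map_append]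
    simp only [List.foldl_cons, List.foldl_nil, ← List.append_assoc]
    exact pvStep_rem e n _

-- A's symbol sequence, as B's three replicated blocks
lemma pvBlocks_eq (n : Nat) (e : Int) (hn : e ≤ 2 * n) :
    (List.range n).map (fun k : Nat => pvSym (e - 2 * (k : Int)))
      = List.replicate ((max e 0).toNat / 2) (['↑','↓'] : List Char) ++
        List.replicate ((max e 0).toNat % 2) ['↑',' '] ++
        List.replicate (n - (max e 0).toNat / 2 - (max e 0).toNat % 2) [' ',' '] := by
  induction n generalizing e with
  | zero =>
    have : (max e 0).toNat = 0 := by omega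
    simp [this]
  | succ n ih =>
    rw [List.range_succ_eq_map, List.map_cons, List.map_map]
    have htail : (List.range n).map ((fun k : Nat => pvSym (e - 2 * (k : Int))) ∘ Nat.succ)
        = (List.range n).map (fun k : Nat => pvSym ((e - 2) - 2 * (k : Int))) := by
      apply List.map_congr_left; intro k _
      simp only [Function.comp]
      congr 1
      push_cast
      ring
    rw [htail]
    by_cases h2 : 2 ≤ e
    · have hp : (max e 0).toNat / 2 = (max (e - 2) 0).toNat / 2 + 1 := by omega
      have hs : (max e 0).toNat % 2 = (max (e - 2) 0).toNat % 2 := by omega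
      rw [ih (e - 2) (by omega)]
      have hcnt : n + 1 - ((max (e-2) 0).toNat / 2 + 1) - (max (e-2) 0).toNat % 2
          = n - (max (e-2) 0).toNat / 2 - (max (e-2) 0).toNat % 2 := by omega
      simp only [Nat.cast_zero, mul_zero, sub_zero, pvSym, hp, hs, hcnt,
        List.replicate_succ, List.cons_append, if_pos h2]
    · by_cases h1 : e = 1
      · subst h1
        rw [show (1:Int) - 2 = -1 from by norm_num, ih (-1) (by omega)]
        have hz : (max (-1 : Int) 0).toNat = 0 := by omega
        have ho : (max (1 : Int) 0).toNat = 1 := by omega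
        simp only [Nat.cast_zero, mul_zero, sub_zero, pvSym, hz, ho, Nat.zero_div,
          Nat.zero_mod, List.replicate_zero, List.nil_append, Nat.sub_zero]
        simp [List.replicate_succ]
      · have hz : (max e 0).toNat = 0 := by omega
        have hz' : (max (e - 2) 0).toNat = 0 := by omega
        rw [ih (e - 2) (by omega)]
        simp only [Nat.cast_zero, mul_zero, sub_zero, pvSym, hz, hz', Nat.zero_div,
          Nat.zero_mod, List.replicate_zero, List.nil_append, Nat.sub_zero]
        rw [if_neg h2, if_neg h1, List.replicate_succ]

-- B's Int-level counts agree with the Nat-level counts used above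
lemma pvCounts (e : Int) :
    (PySem.Int.floordiv (max e 0) 2).toNat = (max e 0).toNat / 2 ∧
    (PySem.Int.mod (max e 0) 2).toNat = (max e 0).toNat % 2 := by
  have h0 : (0:Int) ≤ max e 0 := le_max_right _ _
  rw [PySem.Int.floordiv_eq_ediv_of_pos (by omega), PySem.Int.mod_eq_emod_of_pos (by omega)]
  omega

-- the two lookup tables agree: every capacity is twice the orbital count
lemma pvNum_eq_half_cap (t : List Char) (c : Int) (h : pvCapacities.get? t = some c) :
    (pvNumOrbitals.get? t).getD 0 = PySem.Int.floordiv c 2 := by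
  have hc : pvCapacities = PySem.Dict.mk [(['s'],2),(['p'],6),(['d'],10),(['f'],14),(['g'],18)] := by rfl
  have hn : pvNumOrbitals = PySem.Dict.mk [(['s'],1),(['p'],3),(['d'],5),(['f'],7),(['g'],9)] := by rfl
  rw [hc] at h
  rw [hn]
  simp only [PySem.Dict.get?_mk_cons] at h ⊢
  split_ifs at h ⊢ <;>
    first
      | (injection h with h; subst h; decide)
      | (rw [show (PySem.Dict.mk ([] : List (List Char × Int))).get? t = none from rfl] at h
         cases h)

-- every capacity is even (so num_orbitals = capacity // 2 exactly, and e ≤ cap gives e ≤ 2 * num_orbitals)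
lemma pvCap_cases (t : List Char) (c : Int) (h : pvCapacities.get? t = some c) :
    c = 2 ∨ c = 6 ∨ c = 10 ∨ c = 14 ∨ c = 18 := by
  have hc : pvCapacities = PySem.Dict.mk [(['s'],2),(['p'],6),(['d'],10),(['f'],14),(['g'],18)] := by rfl
  rw [hc] at h
  simp only [PySem.Dict.get?_mk_cons] at h
  split_ifs at h <;>
    first
      | (injection h with h; omega)
      | (rw [show (PySem.Dict.mk ([] : List (List Char × Int))).get? t = none from rfl] at h
         cases h)

theorem pv_main (s : String) : get_orbital_diagram s = get_orbital_diagram_alt s := by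
  unfold get_orbital_diagram get_orbital_diagram_alt
  cases pvParse s.toList with
  | none => rfl
  | some p =>
    obtain ⟨n, t, eo⟩ := p
    cases eo with
    | none => rfl
    | some e =>
      dsimp only
      cases hc : pvCapacities.get? t with
      | none => rfl
      | some cap =>
        dsimp only
        by_cases he : cap < e
        · simp [he]
        · rw [if_neg he, if_neg he, pvNum_eq_half_cap t cap hc]
          have hcap := pvCap_cases t cap hc
          have hv : PySem.Int.floordiv cap 2 = cap / 2 :=
            PySem.Int.floordiv_eq_ediv_of_pos (by omega)
          rw [hv]
          have hstep : (fun (st : List (List Char) × Int) (_ : Int) =>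
              if 2 ≤ st.2 then (st.1 ++ [['↑','↓']], st.2 - 2)
              else if st.2 = 1 then (st.1 ++ [['↑',' ']], st.2 - 1)
              else (st.1 ++ [[' ',' ']], st.2)) = (fun st (_ : Int) => pvStep st) := rfl
          rw [hstep, PySem.List.pyRange_one, List.foldl_map,
            show (fun (st : List (List Char) × Int) (k : Nat) => pvStep st)
              = (fun st (_ : Nat) => pvStep st) from rfl,
            pvLoop_eq,
            pvBlocks_eq ((cap / 2 - 0).toNat) e (by rcases hcap with h|h|h|h|h <;> subst h <;> omega)]
          obtain ⟨hp, hs⟩ := pvCounts e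
          have hfd : PySem.Int.floordiv (max e 0) 2 = (max e 0) / 2 :=
            PySem.Int.floordiv_eq_ediv_of_pos (by omega)
          have hmd : PySem.Int.mod (max e 0) 2 = (max e 0) % 2 :=
            PySem.Int.mod_eq_emod_of_pos (by omega)
          have hemp : (cap / 2 - PySem.Int.floordiv (max e 0) 2 - PySem.Int.mod (max e 0) 2).toNat
              = (cap / 2 - 0).toNat - (max e 0).toNat / 2 - (max e 0).toNat % 2 := by
            rw [hfd, hmd]; omega
          rw [hp, hs, hemp]
          simp only [List.nil_append]

-- ===== VERDICT (by name: the statement is the Claim_ definition above) =====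
theorem get_orbital_diagram_spec : Claim_equal_get_orbital_diagram := by
  intro s _ _
  exact pv_main s
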